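-- pv_equiv track=rewrite | github.com/DevenBhatkar/Harmful_brain_activity_classificaation | app.py | predict_diseases
-- ===== SOURCE A (Python) =====
-- def predict_diseases(predictions):
--     """Predict potential diseases based on brain activity patterns"""
--     diseases = {}
--
--     # Extract vote values
--     seizure_vote = predictions.get('seizure_vote', 0)
--     lpd_vote = predictions.get('lpd_vote', 0)
--     gpd_vote = predictions.get('gpd_vote', 0)
--     lrda_vote = predictions.get('lrda_vote', 0)
--     grda_vote = predictions.get('grda_vote', 0)
--
--     # Define disease prediction rules
--     diseases['Epilepsy'] = (seizure_vote > 0 or lrda_vote > 0)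
--     diseases['Sleep Disorder'] = (gpd_vote > 0 or grda_vote > 0)
--     diseases['Parkinson\'s Disease'] = (gpd_vote > 2 or grda_vote > 2)
--     diseases['Dementia'] = (lpd_vote > 0 and gpd_vote > 0 and grda_vote == 0)
--     diseases['Encephalitis'] = (seizure_vote > 0 or lpd_vote > 0 or lrda_vote > 0)
--     diseases['Traumatic Brain Injury'] = (seizure_vote > 0 and lpd_vote > 0)
--
--     # Calculate confidence levels (simplified approach)
--     disease_confidence = {}
--     for disease, is_present in diseases.items():
--         if is_present:
--             # Calculate a confidence score based on the relevant votes
--             if disease == 'Epilepsy':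
--                 confidence = max(seizure_vote, lrda_vote) * 20  # Scale to percentage
--             elif disease == 'Sleep Disorder':
--                 confidence = max(gpd_vote, grda_vote) * 20
--             elif disease == 'Parkinson\'s Disease':
--                 confidence = max(gpd_vote, grda_vote) * 15
--             elif disease == 'Dementia':
--                 confidence = min(lpd_vote, gpd_vote) * 25
--             elif disease == 'Encephalitis':
--                 confidence = max(seizure_vote, lpd_vote, lrda_vote) * 20
--             elif disease == 'Traumatic Brain Injury':
--                 confidence = min(seizure_vote, lpd_vote) * 30
--             else:
--                 confidence = 50  # Default confidence
--
--             # Cap at 95% to acknowledge uncertainty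
--             confidence = min(confidence, 95)
--             disease_confidence[disease] = confidence
--
--     return disease_confidence
-- ===== SOURCE B (Python) =====
-- # Rule-engine reformulation: each disease's presence test is derived from the
-- # same aggregate vote that sets its confidence (aggregate > threshold, plus an
-- # optional list of votes required to be zero), so the separate boolean table of
-- # A disappears; a generic interpreter loop applies the rules.
-- RULES = [
--     # (name, combiner, vote keys, scale, threshold, keys that must be zero)
--     ('Epilepsy', max, ('seizure_vote', 'lrda_vote'), 20, 0, ()),
--     ('Sleep Disorder', max, ('gpd_vote', 'grda_vote'), 20, 0, ()),
--     ("Parkinson's Disease", max, ('gpd_vote', 'grda_vote'), 15, 2, ()),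
--     ('Dementia', min, ('lpd_vote', 'gpd_vote'), 25, 0, ('grda_vote',)),
--     ('Encephalitis', max, ('seizure_vote', 'lpd_vote', 'lrda_vote'), 20, 0, ()),
--     ('Traumatic Brain Injury', min, ('seizure_vote', 'lpd_vote'), 30, 0, ()),
-- ]
--
-- def predict_diseases(predictions):
--     """Predict potential diseases based on brain activity patterns"""
--     result = {}
--     for name, combine, keys, scale, threshold, must_be_zero in RULES:
--         v = combine(predictions.get(k, 0) for k in keys)
--         if v > threshold and all(predictions.get(k, 0) == 0 for k in must_be_zero):
--             result[name] = min(v * scale, 95)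
--     return result
-- ===== Notes on version B (the rewrite author's own statement) =====
-- stated objective: alternative
-- what changed: Replaced A's two staged passes (build a name->bool presence dict from per-vote disjunctions, then loop over it re-dispatching on the name string to pick a confidence formula) with a generic rule interpreter over a declarative rule table: each rule stores a combiner (max/min), its vote keys, scale, threshold and zero-required keys, and the presence test is derived from the same aggregate that sets the confidence (aggregate > threshold), eliminating the boolean dict and the string dispatch.
import Mathlib
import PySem

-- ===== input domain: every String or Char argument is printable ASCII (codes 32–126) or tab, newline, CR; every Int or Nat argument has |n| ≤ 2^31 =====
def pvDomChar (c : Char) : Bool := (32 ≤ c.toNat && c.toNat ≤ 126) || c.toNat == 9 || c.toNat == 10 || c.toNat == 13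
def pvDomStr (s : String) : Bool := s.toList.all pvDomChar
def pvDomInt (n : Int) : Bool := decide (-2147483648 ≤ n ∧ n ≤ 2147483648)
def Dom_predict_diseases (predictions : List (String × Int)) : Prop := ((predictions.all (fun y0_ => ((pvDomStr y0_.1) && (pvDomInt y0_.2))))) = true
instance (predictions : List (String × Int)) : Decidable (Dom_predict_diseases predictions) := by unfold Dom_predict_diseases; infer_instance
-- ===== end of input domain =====

-- ===== PORT A =====
-- B derives each presence test from the aggregate vote itself (aggregate > threshold) via a generic rule interpreter; return-value equivalence.
-- predictions.get(k, 0): the input dict is an association list, lookup = first match (hand-ported, exact).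
def pvGetVote (preds : List (String × Int)) (k : String) : Int :=
  match preds.find? (fun p => p.1 == k) with
  | some p => p.2
  | none => 0

def predict_diseases (predictions : List (String × Int)) : List (String × Int) :=
  let seizure_vote := pvGetVote predictions "seizure_vote"
  let lpd_vote := pvGetVote predictions "lpd_vote"
  let gpd_vote := pvGetVote predictions "gpd_vote"
  let lrda_vote := pvGetVote predictions "lrda_vote"
  let grda_vote := pvGetVote predictions "grda_vote"
  let diseases : PySem.Dict String Bool :=
    (((((PySem.Dict.empty.insert "Epilepsy"
          (decide (seizure_vote > 0) || decide (lrda_vote > 0))).insert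
        "Sleep Disorder" (decide (gpd_vote > 0) || decide (grda_vote > 0))).insert
        "Parkinson's Disease" (decide (gpd_vote > 2) || decide (grda_vote > 2))).insert
        "Dementia" (decide (lpd_vote > 0) && decide (gpd_vote > 0) && decide (grda_vote = 0))).insert
        "Encephalitis" (decide (seizure_vote > 0) || decide (lpd_vote > 0) || decide (lrda_vote > 0))).insert
        "Traumatic Brain Injury" (decide (seizure_vote > 0) && decide (lpd_vote > 0))
  let disease_confidence : PySem.Dict String Int :=
    diseases.items.foldl (fun dc p =>
      if p.2 then
        let confidence : Int :=
          if p.1 == "Epilepsy" then max seizure_vote lrda_vote * 20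
          else if p.1 == "Sleep Disorder" then max gpd_vote grda_vote * 20
          else if p.1 == "Parkinson's Disease" then max gpd_vote grda_vote * 15
          else if p.1 == "Dementia" then min lpd_vote gpd_vote * 25
          else if p.1 == "Encephalitis" then max seizure_vote (max lpd_vote lrda_vote) * 20
          else if p.1 == "Traumatic Brain Injury" then min seizure_vote lpd_vote * 30
          else 50
        dc.insert p.1 (min confidence 95)
      else dc) PySem.Dict.empty
  disease_confidence.items

-- ===== PORT B =====
-- RULES: (name, combiner — true = max / false = min, vote keys, scale, threshold, keys that must be zero)
def pvRules : List (String × Bool × List String × Int × Int × List String) :=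
  [("Epilepsy", true, ["seizure_vote", "lrda_vote"], 20, 0, []),
   ("Sleep Disorder", true, ["gpd_vote", "grda_vote"], 20, 0, []),
   ("Parkinson's Disease", true, ["gpd_vote", "grda_vote"], 15, 2, []),
   ("Dementia", false, ["lpd_vote", "gpd_vote"], 25, 0, ["grda_vote"]),
   ("Encephalitis", true, ["seizure_vote", "lpd_vote", "lrda_vote"], 20, 0, []),
   ("Traumatic Brain Injury", false, ["seizure_vote", "lpd_vote"], 30, 0, [])]

-- Python max/min over a nonempty sequence: fold from the head (the [] case is unreachable here).
def pvCombine : Bool → List Int → Int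
  | _, [] => 0
  | true, h :: t => t.foldl max h
  | false, h :: t => t.foldl min h

def predict_diseases_alt (predictions : List (String × Int)) : List (String × Int) :=
  pvRules.foldl (fun result rule =>
    let v := pvCombine rule.2.1 (rule.2.2.1.map (pvGetVote predictions))
    if decide (v > rule.2.2.2.2.1) &&
       rule.2.2.2.2.2.all (fun k => pvGetVote predictions k == 0) then
      result ++ [(rule.1, min (v * rule.2.2.2.1) 95)]
    else result) []

-- ===== PRECONDITION & SPEC =====
def Spec_predict_diseases (predictions : List (String × Int)) (out : List (String × Int)) : Prop := out = predict_diseases_alt predictions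
instance (predictions : List (String × Int)) (out : List (String × Int)) : Decidable (Spec_predict_diseases predictions out) := by unfold Spec_predict_diseases; infer_instance

-- ===== CLAIM (what is proved, stated in full; the proofs are below) =====
def Claim_equal_predict_diseases : Prop := ∀ (predictions : List (String × Int)), Dom_predict_diseases predictions → Spec_predict_diseases predictions (predict_diseases predictions)

-- ===== LEMMAS AND PROOFS =====
-- B's "aggregate > threshold" presence tests coincide with A's per-vote disjunctions/conjunctions:
lemma decide_max_gt (a b t : Int) :
    decide (max a b > t) = (decide (a > t) || decide (b > t)) := by
  by_cases ha : a > t <;> by_cases hb : b > t <;>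
    simp [ha, hb, max_def] <;> split <;> omega

lemma decide_min_gt (a b : Int) :
    decide (min a b > 0) = (decide (a > 0) && decide (b > 0)) := by
  by_cases ha : a > 0 <;> by_cases hb : b > 0 <;>
    simp [ha, hb, min_def] <;> split <;> omega

lemma pvBeqInt (a b : Int) : (a == b) = decide (a = b) := rfl

-- Both results are functions of the five extracted votes only: state the equality over five free
-- vote variables (the bodies of the two ports with the lookups abstracted), align the conditions,
-- and compare branch by branch.
lemma predict_core (s l g r d : Int) :
    (let diseases : PySem.Dict String Bool :=
      (((((PySem.Dict.empty.insert "Epilepsy"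
            (decide (s > 0) || decide (r > 0))).insert
          "Sleep Disorder" (decide (g > 0) || decide (d > 0))).insert
          "Parkinson's Disease" (decide (g > 2) || decide (d > 2))).insert
          "Dementia" (decide (l > 0) && decide (g > 0) && decide (d = 0))).insert
          "Encephalitis" (decide (s > 0) || decide (l > 0) || decide (r > 0))).insert
          "Traumatic Brain Injury" (decide (s > 0) && decide (l > 0))
     let disease_confidence : PySem.Dict String Int :=
      diseases.items.foldl (fun dc p =>
        if p.2 then
          let confidence : Int :=
            if p.1 == "Epilepsy" then max s r * 20
            else if p.1 == "Sleep Disorder" then max g d * 20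
            else if p.1 == "Parkinson's Disease" then max g d * 15
            else if p.1 == "Dementia" then min l g * 25
            else if p.1 == "Encephalitis" then max s (max l r) * 20
            else if p.1 == "Traumatic Brain Injury" then min s l * 30
            else 50
          dc.insert p.1 (min confidence 95)
        else dc) PySem.Dict.empty
     disease_confidence.items) =
    (let vote : String → Int := fun k =>
       if k == "seizure_vote" then s else if k == "lpd_vote" then l
       else if k == "gpd_vote" then g else if k == "lrda_vote" then r else d
     pvRules.foldl (fun result rule =>
       let v := pvCombine rule.2.1 (rule.2.2.1.map vote)
       if decide (v > rule.2.2.2.2.1) &&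
          rule.2.2.2.2.2.all (fun k => vote k == 0) then
         result ++ [(rule.1, min (v * rule.2.2.2.1) 95)]
       else result) []) := by
  simp only [pvRules, pvCombine, List.foldl, List.map, List.all, String.reduceBEq,
    Bool.false_eq_true, if_false, if_true, pvBeqInt, Bool.and_true,
    ← decide_max_gt, ← decide_min_gt, ← max_assoc]
  generalize decide (max s r > 0) = b1
  generalize decide (max g d > 0) = b2
  generalize decide (max g d > 2) = b3
  generalize decide (min l g > 0) = b4a
  generalize decide (d = 0) = b4b
  generalize decide (max (max s l) r > 0) = b5
  generalize decide (min s l > 0) = b6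
  cases b1 <;> cases b2 <;> cases b3 <;> cases b4a <;> cases b4b <;> cases b5 <;> cases b6 <;> rfl

-- B looks the five votes up through pvGetVote on the fixed key literals; the abstracted lookup
-- function of predict_core instantiates to exactly those values.
lemma predict_core_eq (predictions : List (String × Int)) :
    predict_diseases predictions = predict_diseases_alt predictions := by
  have h := predict_core (pvGetVote predictions "seizure_vote") (pvGetVote predictions "lpd_vote")
    (pvGetVote predictions "gpd_vote") (pvGetVote predictions "lrda_vote")
    (pvGetVote predictions "grda_vote")
  unfold predict_diseases predict_diseases_alt
  refine h.trans ?_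
  simp only [pvRules, List.foldl, List.map, List.all]
  rfl

-- ===== VERDICT (by name: the statement is the Claim_ definition above) =====
theorem predict_diseases_spec : Claim_equal_predict_diseases := by
  intro predictions _
  unfold Spec_predict_diseases
  exact predict_core_eq predictions
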